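-- pv_equiv track=rewrite | github.com/Digu-patil/PyLeetCode | InBuiltPyFunc/StrFunctions/split.py | split_func
-- ===== SOURCE A (Python) =====
-- def split_func(str_val: str, delimiter = None):
--     '''
--     This function will create a list based on the input string and the provided delimiter
--     i.e., 'geeks for geeks' with delimiter = ' ' will return ['geeks', 'for', 'geeks']
--     '''
--     if delimiter is None:
--         delimiter = ' '
--     start = 0
--     end = 0
--     str_len = len(str_val)
--     ls = []
--     while end < str_len:
--         if str_val[end] == delimiter:
--             if start != end:
--                 ls.append(str_val[start:end])
--             start = end + 1
--         end += 1
--     if str_val[start:end]: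
--         ls.append(str_val[start:end])
--     return ls
-- ===== SOURCE B (Python) =====
-- def split_func(str_val: str, delimiter = None):
--     '''Run-scanner: skip delimiter characters, peel off each maximal
--     non-delimiter run as one token.'''
--     if delimiter is None:
--         delimiter = ' '
--     tokens = []
--     i = 0
--     n = len(str_val)
--     while i < n:
--         if str_val[i] == delimiter:
--             i += 1
--             continue
--         j = i + 1
--         while j < n and str_val[j] != delimiter:
--             j += 1
--         tokens.append(str_val[i:j])
--         i = j
--     return tokens
-- ===== Notes on version B (the rewrite author's own statement) =====
-- stated objective: alternative
-- what changed: A advances a single end index comparing start/end to decide token boundaries and emits a leftover tail after the loop; B is a two-pointer run scanner that skips delimiter characters and peels off each maximal non-delimiter run as one token, with no post-loop tail case.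
import Mathlib
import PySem

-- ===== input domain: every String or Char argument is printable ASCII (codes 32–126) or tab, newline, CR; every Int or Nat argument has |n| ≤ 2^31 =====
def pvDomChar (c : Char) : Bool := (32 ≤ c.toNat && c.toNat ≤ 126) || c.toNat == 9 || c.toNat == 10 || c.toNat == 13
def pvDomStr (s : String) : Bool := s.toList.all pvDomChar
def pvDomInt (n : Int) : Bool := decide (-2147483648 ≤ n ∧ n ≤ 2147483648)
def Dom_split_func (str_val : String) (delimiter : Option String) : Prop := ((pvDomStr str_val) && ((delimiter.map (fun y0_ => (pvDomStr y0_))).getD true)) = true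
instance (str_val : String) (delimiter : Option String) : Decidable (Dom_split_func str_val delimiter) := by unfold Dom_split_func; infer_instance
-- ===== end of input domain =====

-- B replaces A's single-index start/end scan (with a post-loop tail emit) by a
-- two-pointer run scanner that skips delimiters and peels off maximal non-delimiter
-- runs; same cost, alternative structure.


-- ===== PORT A =====
-- A's while loop: advance `e`; on a delimiter char emit str_val[s:e] when s ≠ e and
-- reset s; after the loop emit the non-empty tail slice str_val[s:e].
def split_func_loop (d : String) (cs : List Char) (s e : Nat) (ls : List String) : List String :=
  if h : e < cs.length then
    if String.ofList [cs[e]] == d then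
      split_func_loop d cs (e + 1) (e + 1)
        (if s ≠ e then ls ++ [String.ofList (PySem.List.slice cs (some (s : Int)) (some (e : Int)))] else ls)
    else
      split_func_loop d cs s (e + 1) ls
  else
    let tail := PySem.List.slice cs (some (s : Int)) (some (e : Int))
    if tail ≠ [] then ls ++ [String.ofList tail] else ls
termination_by cs.length - e

def split_func (str_val : String) (delimiter : Option String) : List String :=
  let d := delimiter.getD " "
  split_func_loop d str_val.toList 0 0 []

-- ===== PORT B =====
-- B's outer while: skip a delimiter char, or take the maximal non-delimiter run
-- (the inner while) as one token.
def splitRuns (d : String) : List Char → List (List Char)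
  | [] => []
  | c :: cs =>
    if String.ofList [c] == d then splitRuns d cs
    else (c :: cs.takeWhile (fun x => !(String.ofList [x] == d))) ::
         splitRuns d (cs.dropWhile (fun x => !(String.ofList [x] == d)))
termination_by l => l.length
decreasing_by
  · simp
  · exact Nat.lt_succ_of_le (List.length_dropWhile_le _ _)

def split_func_alt (str_val : String) (delimiter : Option String) : List String :=
  let d := delimiter.getD " "
  (splitRuns d str_val.toList).map String.ofList

-- ===== PRECONDITION & SPEC =====
def Spec_split_func (str_val : String) (delimiter : Option String) (out : List String) : Prop := out = split_func_alt str_val delimiter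
instance (str_val : String) (delimiter : Option String) (out : List String) : Decidable (Spec_split_func str_val delimiter out) := by unfold Spec_split_func; infer_instance

-- ===== CLAIM (what is proved, stated in full; the proofs are below) =====
def Claim_equal_split_func : Prop := ∀ (str_val : String) (delimiter : Option String), Dom_split_func str_val delimiter → Spec_split_func str_val delimiter (split_func str_val delimiter)

-- ===== LEMMAS AND PROOFS =====

-- A's loop state as "current partial token + remaining suffix".
def goTok (d : String) (cur : List Char) : List Char → List (List Char)
  | [] => if cur = [] then [] else [cur]
  | c :: rest =>
    if String.ofList [c] == d then
      (if cur = [] then goTok d [] rest else cur :: goTok d [] rest)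
    else goTok d (cur ++ [c]) rest

theorem splitRuns_split (d : String) (cs : List Char) :
    (if cs.takeWhile (fun x => !(String.ofList [x] == d)) = [] then []
     else [cs.takeWhile (fun x => !(String.ofList [x] == d))]) ++
      splitRuns d (cs.dropWhile (fun x => !(String.ofList [x] == d))) = splitRuns d cs := by
  cases cs with
  | nil => simp [splitRuns]
  | cons c cs =>
    by_cases hc : String.ofList [c] == d
    · simp [splitRuns, hc, List.takeWhile, List.dropWhile]
    · simp [splitRuns, hc, List.takeWhile, List.dropWhile]

theorem goTok_eq (d : String) (cs : List Char) : ∀ cur : List Char,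
    goTok d cur cs =
      (if cur ++ cs.takeWhile (fun x => !(String.ofList [x] == d)) = [] then []
       else [cur ++ cs.takeWhile (fun x => !(String.ofList [x] == d))]) ++
        splitRuns d (cs.dropWhile (fun x => !(String.ofList [x] == d))) := by
  induction cs with
  | nil => intro cur; simp [goTok, splitRuns]
  | cons c rest ih =>
    intro cur
    by_cases hc : String.ofList [c] == d
    · have htw : (c :: rest).takeWhile (fun x => !(String.ofList [x] == d)) = [] := by
        simp [hc]
      have hdw : (c :: rest).dropWhile (fun x => !(String.ofList [x] == d)) = c :: rest := by
        simp [hc]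
      have hstep : splitRuns d (c :: rest) = splitRuns d rest := by
        rw [splitRuns]; simp [hc]
      have hgo : goTok d cur (c :: rest)
          = (if cur = [] then goTok d [] rest else cur :: goTok d [] rest) := by
        simp [goTok, hc]
      rw [htw, hdw, hstep, hgo, ih [], List.nil_append, splitRuns_split d rest]
      by_cases hcur : cur = [] <;> simp [hcur]
    · have hgo : goTok d cur (c :: rest) = goTok d (cur ++ [c]) rest := by
        simp [goTok, hc]
      rw [hgo, ih (cur ++ [c])]
      simp [hc]

theorem goTok_nil_eq (d : String) (cs : List Char) : goTok d [] cs = splitRuns d cs := by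
  rw [goTok_eq]
  simp only [List.nil_append]
  exact splitRuns_split d cs

theorem loop_eq (d : String) (cs : List Char) : ∀ n s e (ls : List String),
    s ≤ e → e ≤ cs.length → cs.length - e = n →
    split_func_loop d cs s e ls =
      ls ++ (goTok d ((cs.drop s).take (e - s)) (cs.drop e)).map String.ofList := by
  intro n
  induction n with
  | zero =>
    intro s e ls hs he hn
    have he' : e = cs.length := by omega
    rw [split_func_loop]
    simp only [he'] at *
    rw [dif_neg (by omega)]
    rw [PySem.List.slice_natCast]
    have : cs.drop cs.length = [] := by simp
    rw [this]
    by_cases hne : (cs.drop s).take (cs.length - s) = []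
    · simp [goTok, hne]
    · simp [goTok, hne]
  | succ n ih =>
    intro s e ls hs he hn
    have hlt : e < cs.length := by omega
    have hdrop : cs.drop e = cs[e] :: cs.drop (e + 1) := List.drop_eq_getElem_cons hlt
    rw [split_func_loop, dif_pos hlt]
    have hcurlen : ((cs.drop s).take (e - s)).length = e - s := by
      simp [List.length_take, List.length_drop]; omega
    have hcur_nil : ((cs.drop s).take (e - s) = []) ↔ s = e := by
      rw [← List.length_eq_zero_iff, hcurlen]; omega
    by_cases hc : String.ofList [cs[e]] == d
    · rw [if_pos hc]
      rw [ih (e + 1) (e + 1) _ (by omega) (by omega) (by omega)]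
      rw [hdrop]
      simp only [goTok, hc, if_pos]
      by_cases hse : s ≠ e
      · rw [if_pos hse]
        rw [if_neg (by rw [hcur_nil]; omega)]
        rw [PySem.List.slice_natCast]
        simp [List.map_cons]
      · rw [if_neg hse]
        rw [if_pos (by rw [hcur_nil]; omega)]
        simp
    · have htake : (cs.drop s).take (e + 1 - s) = (cs.drop s).take (e - s) ++ [cs[e]] := by
        have h1 : e + 1 - s = (e - s) + 1 := by omega
        have h2 : s + (e - s) = e := by omega
        have hget : (cs.drop s)[e - s]? = some cs[e] := by
          rw [List.getElem?_drop, h2]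
          exact List.getElem?_eq_getElem hlt
        rw [h1, List.take_add_one, hget]
        rfl
      rw [if_neg hc]
      rw [ih s (e + 1) ls (by omega) (by omega) (by omega)]
      rw [hdrop, htake]
      simp [goTok, hc]

-- ===== VERDICT (by name: the statement is the Claim_ definition above) =====
theorem split_func_spec : Claim_equal_split_func := by
  intro str_val delimiter _
  unfold Spec_split_func split_func split_func_alt
  rw [loop_eq _ _ (str_val.toList.length) 0 0 [] (by omega) (by omega) (by omega)]
  simp [goTok_nil_eq]
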